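-- pv_equiv track=rewrite | github.com/hazelian0619/graph-rag | pipelines/interaction_ontology_mapping/scripts/build_interaction_ontology_mapping.py | infer_method_from_edge_source
-- ===== SOURCE A (Python) =====
-- def normalize(v: str) -> str:
--     return (v or "").strip()
--
-- def lower(v: str) -> str:
--     return normalize(v).lower()
--
-- def infer_method_from_edge_source(interaction_type: str, source: str) -> str:
--     s = lower(source)
--     if interaction_type == "PPI":
--         if "string" in s:
--             return "string_combined_score"
--         return "predicted_interaction"
--     if interaction_type == "PSI":
--         if "drugbank" in s:
--             return "drug_target_curation"
--         return "curated_interaction"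
--     if interaction_type == "RPI":
--         if any(x in s for x in ["starbase", "encori"]):
--             return "clip_supported_record"
--         if "rnainter" in s:
--             return "rnainter_record"
--         if "npinter" in s:
--             return "npinter_record"
--         return "rna_protein_record"
--     return "interaction_record"
-- ===== SOURCE B (Python) =====
-- # One flat ordered rule list: each row is (interaction_type, marker, label); a row
-- # fires when the type matches exactly and the marker occurs in the lowered source.
-- # Defaults are ordinary rows with the empty marker (a substring of everything), and
-- # the starbase/encori "any" group becomes two consecutive rows with the same label.
-- _RULES = [
--     ("PPI", "string",   "string_combined_score"),
--     ("PPI", "",         "predicted_interaction"),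
--     ("PSI", "drugbank", "drug_target_curation"),
--     ("PSI", "",         "curated_interaction"),
--     ("RPI", "starbase", "clip_supported_record"),
--     ("RPI", "encori",   "clip_supported_record"),
--     ("RPI", "rnainter", "rnainter_record"),
--     ("RPI", "npinter",  "npinter_record"),
--     ("RPI", "",         "rna_protein_record"),
-- ]
--
-- def infer_method_from_edge_source(interaction_type: str, source: str) -> str:
--     s = (source or "").strip().lower()
--     return next((label for t, marker, label in _RULES
--                  if t == interaction_type and marker in s),
--                 "interaction_record")
-- ===== Notes on version B (the rewrite author's own statement) =====
-- stated objective: alternative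
-- what changed: Replaced the nested if/elif ladder (per-type branch, then per-type substring checks with an any() group and a default fallthrough) by a single flat ordered rule list of (type, marker, label) rows scanned once first-match, with defaults encoded as empty-marker rows and the starbase/encori group flattened into two rows.
import Mathlib
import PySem

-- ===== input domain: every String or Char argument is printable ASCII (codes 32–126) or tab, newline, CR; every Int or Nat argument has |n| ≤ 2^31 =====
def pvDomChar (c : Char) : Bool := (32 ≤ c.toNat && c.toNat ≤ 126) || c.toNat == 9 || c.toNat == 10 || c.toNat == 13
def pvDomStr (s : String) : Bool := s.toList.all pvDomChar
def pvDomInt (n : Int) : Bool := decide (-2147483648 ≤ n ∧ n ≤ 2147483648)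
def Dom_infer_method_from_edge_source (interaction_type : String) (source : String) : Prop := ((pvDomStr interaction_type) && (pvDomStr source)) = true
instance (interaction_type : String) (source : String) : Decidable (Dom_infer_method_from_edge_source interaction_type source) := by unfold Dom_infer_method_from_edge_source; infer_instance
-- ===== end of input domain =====

-- B replaces A's nested if/elif ladder by one flat ordered (type, marker, label) rule
-- list scanned first-match, defaults encoded as empty-marker rows; objective: alternative.

-- ===== PORT A =====
-- normalize(v) = (v or "").strip(); on strings 'v or ""' is v unless v == "", where it is "" — same strip result.
def pyNormalize (v : String) : String := PySem.Str.strip v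
-- lower(v) = normalize(v).lower()
def pyLower (v : String) : String := PySem.Str.lower (pyNormalize v)

def infer_method_from_edge_source (interaction_type : String) (source : String) : String :=
  let s := pyLower source
  if interaction_type = "PPI" then
    if PySem.Str.isIn "string" s then "string_combined_score"
    else "predicted_interaction"
  else if interaction_type = "PSI" then
    if PySem.Str.isIn "drugbank" s then "drug_target_curation"
    else "curated_interaction"
  else if interaction_type = "RPI" then
    if (["starbase", "encori"].any (fun x => PySem.Str.isIn x s)) then "clip_supported_record"
    else if PySem.Str.isIn "rnainter" s then "rnainter_record"
    else if PySem.Str.isIn "npinter" s then "npinter_record"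
    else "rna_protein_record"
  else "interaction_record"

-- ===== PORT B =====
def pvRules : List (String × String × String) :=
  [("PPI", "string",   "string_combined_score"),
   ("PPI", "",         "predicted_interaction"),
   ("PSI", "drugbank", "drug_target_curation"),
   ("PSI", "",         "curated_interaction"),
   ("RPI", "starbase", "clip_supported_record"),
   ("RPI", "encori",   "clip_supported_record"),
   ("RPI", "rnainter", "rnainter_record"),
   ("RPI", "npinter",  "npinter_record"),
   ("RPI", "",         "rna_protein_record")]

-- next((label for t, marker, label in _RULES if t == it and marker in s), "interaction_record")
def pvFirstMatch (it s : String) : List (String × String × String) → String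
  | [] => "interaction_record"
  | (t, marker, label) :: rest =>
    if t = it ∧ PySem.Str.isIn marker s then label else pvFirstMatch it s rest

def infer_method_from_edge_source_alt (interaction_type : String) (source : String) : String :=
  let s := PySem.Str.lower (PySem.Str.strip source)
  pvFirstMatch interaction_type s pvRules

-- ===== PRECONDITION & SPEC =====
def Spec_infer_method_from_edge_source (interaction_type : String) (source : String) (out : String) : Prop := out = infer_method_from_edge_source_alt interaction_type source
instance (interaction_type : String) (source : String) (out : String) : Decidable (Spec_infer_method_from_edge_source interaction_type source out) := by unfold Spec_infer_method_from_edge_source; infer_instance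

-- ===== CLAIM =====
def Claim_equal_infer_method_from_edge_source : Prop := ∀ (interaction_type : String) (source : String), Dom_infer_method_from_edge_source interaction_type source → Spec_infer_method_from_edge_source interaction_type source (infer_method_from_edge_source interaction_type source)

-- ===== LEMMAS AND PROOFS =====
-- ===== VERDICT =====
theorem infer_method_from_edge_source_spec : Claim_equal_infer_method_from_edge_source := by
  intro it src _
  unfold Spec_infer_method_from_edge_source infer_method_from_edge_source
    infer_method_from_edge_source_alt pyLower pyNormalize pvRules
  by_cases h1 : it = "PPI"
  · subst h1; simp [pvFirstMatch]
  by_cases h2 : it = "PSI"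
  · subst h2; simp [pvFirstMatch, h1]
  by_cases h3 : it = "RPI"
  · subst h3
    by_cases hs : PySem.Str.isIn "starbase" (PySem.Str.lower (PySem.Str.strip src)) = true <;>
      by_cases he : PySem.Str.isIn "encori" (PySem.Str.lower (PySem.Str.strip src)) = true <;>
        simp_all [pvFirstMatch]
  · simp [pvFirstMatch, Ne.symm h1, Ne.symm h2, Ne.symm h3, h1, h2, h3]
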